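-- pv_equiv track=rewrite | github.com/jacksoncode/jacksoncode.github.io | module/fund_monitor/src/data_processor.py | _get_performance_distribution
-- ===== SOURCE A (Python) =====
-- from typing import Dict, List, Optional, Any, Tuple
--
-- def _get_performance_distribution(processed_funds: List[Dict[str, Any]]) -> Dict[str, int]:
--     """获取表现分布统计"""
--     distribution = {
--         'excellent': 0,
--         'good': 0,
--         'average': 0,
--         'poor': 0,
--         'terrible': 0,
--         'unknown': 0
--     }
--
--     for fund in processed_funds:
--         level = fund.get('performance_level', 'unknown')
--         if level in distribution:
--             distribution[level] += 1
--
--     return distribution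
-- ===== SOURCE B (Python) =====
-- from typing import Dict, List, Any
--
-- KEYS = ('excellent', 'good', 'average', 'poor', 'terrible', 'unknown')
--
-- def _get_performance_distribution(processed_funds: List[Dict[str, Any]]) -> Dict[str, int]:
--     """Divide and conquer: split the list in half, compute each half's six
--     subcounts recursively, merge by pointwise addition, then zip onto KEYS."""
--     def counts(funds):
--         n = len(funds)
--         if n == 0:
--             return (0, 0, 0, 0, 0, 0)
--         if n == 1:
--             level = funds[0].get('performance_level', 'unknown')
--             return tuple(1 if level == k else 0 for k in KEYS)
--         mid = n // 2
--         left = counts(funds[:mid])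
--         right = counts(funds[mid:])
--         return tuple(l + r for l, r in zip(left, right))
--     return dict(zip(KEYS, counts(processed_funds)))
-- ===== Notes on version B (the rewrite author's own statement) =====
-- stated objective: alternative
-- what changed: Replaces A's single forward pass over a seeded dict (with an in-loop membership guard and increments) by a divide-and-conquer recursion: split the fund list in half, recursively compute each half's six-tuple of subcounts, merge them by pointwise addition, and finally zip the merged tuple onto the fixed key order.
import Mathlib
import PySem

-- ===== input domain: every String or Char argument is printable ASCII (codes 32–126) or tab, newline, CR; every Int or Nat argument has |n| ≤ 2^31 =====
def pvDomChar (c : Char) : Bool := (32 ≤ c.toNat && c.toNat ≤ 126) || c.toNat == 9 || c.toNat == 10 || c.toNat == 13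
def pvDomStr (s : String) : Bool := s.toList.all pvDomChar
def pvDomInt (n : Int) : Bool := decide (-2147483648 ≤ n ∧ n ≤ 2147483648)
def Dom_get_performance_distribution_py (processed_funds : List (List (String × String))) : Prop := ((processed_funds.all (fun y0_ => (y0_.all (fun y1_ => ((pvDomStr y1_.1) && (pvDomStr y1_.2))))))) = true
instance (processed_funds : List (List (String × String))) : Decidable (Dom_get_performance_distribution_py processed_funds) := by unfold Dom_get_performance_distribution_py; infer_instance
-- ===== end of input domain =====

-- B replaces A's single forward pass over a seeded dict by a divide-and-conquer
-- recursion (split in half, merge the six subcounts pointwise, zip onto the keys);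
-- same cost, genuinely different algorithm structure.

-- shared helper: fund.get('performance_level', 'unknown')  (both Pythons perform this lookup)
def pvLevel (fund : List (String × String)) : String :=
  (PySem.Dict.mk fund).getD "performance_level" "unknown"

-- ===== PORT A =====
def get_performance_distribution_py (processed_funds : List (List (String × String))) : List (String × Int) :=
  (processed_funds.foldl
    (fun d fund =>
      let level := pvLevel fund
      if d.contains level then d.insert level (d.getD level 0 + 1) else d)
    (PySem.Dict.mk [("excellent", 0), ("good", 0), ("average", 0), ("poor", 0), ("terrible", 0), ("unknown", 0)])).items

-- ===== PORT B =====
-- Source B's inner 'counts': divide and conquer on the fund list, six-tuple of subcounts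
def pvCounts (funds : List (List (String × String))) : Int × Int × Int × Int × Int × Int :=
  if _h0 : funds.length = 0 then (0, 0, 0, 0, 0, 0)
  else if _h1 : funds.length = 1 then
    let level := pvLevel funds.headI       -- funds[0]; length = 1 here
    (if level = "excellent" then 1 else 0, if level = "good" then 1 else 0,
     if level = "average" then 1 else 0, if level = "poor" then 1 else 0,
     if level = "terrible" then 1 else 0, if level = "unknown" then 1 else 0)
  else
    let mid := funds.length / 2
    let L := pvCounts (funds.take mid)     -- funds[:mid]
    let R := pvCounts (funds.drop mid)     -- funds[mid:]
    (L.1 + R.1, L.2.1 + R.2.1, L.2.2.1 + R.2.2.1, L.2.2.2.1 + R.2.2.2.1,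
     L.2.2.2.2.1 + R.2.2.2.2.1, L.2.2.2.2.2 + R.2.2.2.2.2)
termination_by funds.length
decreasing_by
  · simp only [List.length_take]; omega
  · simp only [List.length_drop]; omega

-- dict(zip(KEYS, counts(processed_funds)))
def get_performance_distribution_py_alt (processed_funds : List (List (String × String))) : List (String × Int) :=
  let c := pvCounts processed_funds
  [("excellent", c.1), ("good", c.2.1), ("average", c.2.2.1),
   ("poor", c.2.2.2.1), ("terrible", c.2.2.2.2.1), ("unknown", c.2.2.2.2.2)]

-- ===== PRECONDITION & SPEC =====
def Spec_get_performance_distribution_py (processed_funds : List (List (String × String))) (out : List (String × Int)) : Prop := out = get_performance_distribution_py_alt processed_funds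
instance (processed_funds : List (List (String × String))) (out : List (String × Int)) : Decidable (Spec_get_performance_distribution_py processed_funds out) := by unfold Spec_get_performance_distribution_py; infer_instance

-- ===== CLAIM (what is proved, stated in full; the proofs are below) =====
def Claim_equal_get_performance_distribution_py : Prop := ∀ (processed_funds : List (List (String × String))), Dom_get_performance_distribution_py processed_funds → Spec_get_performance_distribution_py processed_funds (get_performance_distribution_py processed_funds)

-- ===== LEMMAS AND PROOFS =====

-- A's loop body as a named step (definitionally the fold body of the A port)
def pvStep (d : PySem.Dict String Int) (fund : List (String × String)) : PySem.Dict String Int :=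
  let level := pvLevel fund
  if d.contains level then d.insert level (d.getD level 0 + 1) else d

-- loop invariant for A's fold: starting from the six fixed keys with arbitrary counts,
-- the fold adds to each key's count the number of funds whose level equals that key.
lemma pv_fold_inv (fs : List (List (String × String))) :
    ∀ (a b c d e f : Int),
      (fs.foldl pvStep
        (PySem.Dict.mk [("excellent", a), ("good", b), ("average", c), ("poor", d), ("terrible", e), ("unknown", f)])).items
      = [("excellent", a + ((fs.map pvLevel).count "excellent" : Int)),
         ("good", b + ((fs.map pvLevel).count "good" : Int)),
         ("average", c + ((fs.map pvLevel).count "average" : Int)),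
         ("poor", d + ((fs.map pvLevel).count "poor" : Int)),
         ("terrible", e + ((fs.map pvLevel).count "terrible" : Int)),
         ("unknown", f + ((fs.map pvLevel).count "unknown" : Int))] := by
  induction fs with
  | nil => intro a b c d e f; simp
  | cons x fs ih =>
    intro a b c d e f
    simp only [List.foldl_cons, List.map_cons, List.count_cons]
    by_cases h1 : pvLevel x = "excellent"
    · rw [show pvStep (PySem.Dict.mk [("excellent", a), ("good", b), ("average", c), ("poor", d), ("terrible", e), ("unknown", f)]) x
            = PySem.Dict.mk [("excellent", a + 1), ("good", b), ("average", c), ("poor", d), ("terrible", e), ("unknown", f)] from by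
          simp [pvStep, h1, PySem.Dict.contains, PySem.Dict.insert, PySem.Dict.getD, PySem.Dict.get?], ih]
      simp [h1]; omega
    by_cases h2 : pvLevel x = "good"
    · rw [show pvStep (PySem.Dict.mk [("excellent", a), ("good", b), ("average", c), ("poor", d), ("terrible", e), ("unknown", f)]) x
            = PySem.Dict.mk [("excellent", a), ("good", b + 1), ("average", c), ("poor", d), ("terrible", e), ("unknown", f)] from by
          simp [pvStep, h2, PySem.Dict.contains, PySem.Dict.insert, PySem.Dict.getD, PySem.Dict.get?], ih]
      simp [h2]; omega
    by_cases h3 : pvLevel x = "average"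
    · rw [show pvStep (PySem.Dict.mk [("excellent", a), ("good", b), ("average", c), ("poor", d), ("terrible", e), ("unknown", f)]) x
            = PySem.Dict.mk [("excellent", a), ("good", b), ("average", c + 1), ("poor", d), ("terrible", e), ("unknown", f)] from by
          simp [pvStep, h3, PySem.Dict.contains, PySem.Dict.insert, PySem.Dict.getD, PySem.Dict.get?], ih]
      simp [h3]; omega
    by_cases h4 : pvLevel x = "poor"
    · rw [show pvStep (PySem.Dict.mk [("excellent", a), ("good", b), ("average", c), ("poor", d), ("terrible", e), ("unknown", f)]) x
            = PySem.Dict.mk [("excellent", a), ("good", b), ("average", c), ("poor", d + 1), ("terrible", e), ("unknown", f)] from by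
          simp [pvStep, h4, PySem.Dict.contains, PySem.Dict.insert, PySem.Dict.getD, PySem.Dict.get?], ih]
      simp [h4]; omega
    by_cases h5 : pvLevel x = "terrible"
    · rw [show pvStep (PySem.Dict.mk [("excellent", a), ("good", b), ("average", c), ("poor", d), ("terrible", e), ("unknown", f)]) x
            = PySem.Dict.mk [("excellent", a), ("good", b), ("average", c), ("poor", d), ("terrible", e + 1), ("unknown", f)] from by
          simp [pvStep, h5, PySem.Dict.contains, PySem.Dict.insert, PySem.Dict.getD, PySem.Dict.get?], ih]
      simp [h5]; omega
    by_cases h6 : pvLevel x = "unknown"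
    · rw [show pvStep (PySem.Dict.mk [("excellent", a), ("good", b), ("average", c), ("poor", d), ("terrible", e), ("unknown", f)]) x
            = PySem.Dict.mk [("excellent", a), ("good", b), ("average", c), ("poor", d), ("terrible", e), ("unknown", f + 1)] from by
          simp [pvStep, h6, PySem.Dict.contains, PySem.Dict.insert, PySem.Dict.getD, PySem.Dict.get?], ih]
      simp [h6]; omega
    · rw [show pvStep (PySem.Dict.mk [("excellent", a), ("good", b), ("average", c), ("poor", d), ("terrible", e), ("unknown", f)]) x
            = PySem.Dict.mk [("excellent", a), ("good", b), ("average", c), ("poor", d), ("terrible", e), ("unknown", f)] from by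
          simp only [pvStep, PySem.Dict.contains]
          simp
          rintro (h|h|h|h|h|h)
          exacts [absurd h.symm h1, absurd h.symm h2, absurd h.symm h3,
                  absurd h.symm h4, absurd h.symm h5, absurd h.symm h6], ih]
      simp [h1, h2, h3, h4, h5, h6]

-- B's divide-and-conquer recursion computes exactly the six level counts.
lemma pvCounts_eq (n : ℕ) : ∀ (fs : List (List (String × String))), fs.length = n →
    pvCounts fs =
      (((fs.map pvLevel).count "excellent" : Int), ((fs.map pvLevel).count "good" : Int),
       ((fs.map pvLevel).count "average" : Int), ((fs.map pvLevel).count "poor" : Int),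
       ((fs.map pvLevel).count "terrible" : Int), ((fs.map pvLevel).count "unknown" : Int)) := by
  induction n using Nat.strong_induction_on with
  | _ n ih =>
    intro fs hlen
    rw [pvCounts]
    by_cases h0 : fs.length = 0
    · have : fs = [] := List.length_eq_zero_iff.mp h0
      subst this; simp
    by_cases h1 : fs.length = 1
    · obtain ⟨x, hx⟩ := List.length_eq_one_iff.mp h1
      subst hx
      simp only [dif_neg h0, dif_pos h1, List.headI, List.map_cons, List.map_nil,
                 List.count_cons, List.count_nil, beq_iff_eq]
      split_ifs <;> simp
    · simp only [dif_neg h0, dif_neg h1]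
      have hmidlt : fs.length / 2 < fs.length := by omega
      have hmidpos : 0 < fs.length / 2 := by omega
      rw [ih (fs.take (fs.length / 2)).length (by simp [List.length_take]; omega) _ rfl,
          ih (fs.drop (fs.length / 2)).length (by simp [List.length_drop]; omega) _ rfl]
      simp only [List.map_take, List.map_drop, Prod.mk.injEq]
      refine ⟨?_, ?_, ?_, ?_, ?_, ?_⟩ <;>
        rw [← Nat.cast_add, ← List.count_append, List.take_append_drop]

-- ===== VERDICT (by name: the statement is the Claim_ definition above) =====
theorem get_performance_distribution_py_spec : Claim_equal_get_performance_distribution_py := by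
  intro pf _
  unfold Spec_get_performance_distribution_py get_performance_distribution_py get_performance_distribution_py_alt
  rw [show (fun (d : PySem.Dict String Int) (fund : List (String × String)) =>
        let level := pvLevel fund
        if d.contains level then d.insert level (d.getD level 0 + 1) else d) = pvStep from rfl]
  rw [pv_fold_inv, pvCounts_eq pf.length pf rfl]
  simp
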